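-- pv_equiv track=rewrite | github.com/Vanilla0731/Zappy-AI | src/zappy/ai_helpers.py | get_path_to_tile
-- ===== SOURCE A (Python) =====
-- def get_path_to_tile(tile_index: int):
--     """
--     Find the path to a tile and generate the sequence of commands to move to it.
--     """
--     if tile_index <= 0:
--         return []
--
--     path = []
--     level = 0
--     tiles_in_level = 1
--     # Calculate the depth of the tile
--     while tile_index >= tiles_in_level:
--         tile_index -= tiles_in_level
--         level += 1
--         tiles_in_level = 2 * level + 1
--     # Now tile_index is the index in the current level
--
--     # 1. Move to the correct level
--     path.extend(["Forward"] * level)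
--
--     # 2. Move to the correct tile in the level
--     center_of_level = level
--     if tile_index < center_of_level:
--         path.append("Left")
--         # Move to the left side of the level
--         path.extend(["Forward"] * (center_of_level - tile_index))
--     elif tile_index > center_of_level:
--         path.append("Right")
--         # Move to the right side of the level
--         path.extend(["Forward"] * (tile_index - center_of_level))
--     else:
--         # Already at the center of the level
--         pass
--     return path
-- ===== SOURCE B (Python) =====
-- def get_path_to_tile(tile_index: int):
--     """Closed-form: level = isqrt(tile_index) via binary search, pos = tile_index - level**2."""
--     if tile_index <= 0:
--         return []
--     # binary search for the integer square root
--     lo, hi = 0, tile_index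
--     while lo < hi:
--         mid = (lo + hi + 1) // 2
--         if mid * mid <= tile_index:
--             lo = mid
--         else:
--             hi = mid - 1
--     level = lo
--     pos = tile_index - level * level
--     d = pos - level
--     if d < 0:
--         return ["Forward"] * level + ["Left"] + ["Forward"] * (-d)
--     if d > 0:
--         return ["Forward"] * level + ["Right"] + ["Forward"] * d
--     return ["Forward"] * level
-- ===== Notes on version B (the rewrite author's own statement) =====
-- stated objective: faster
-- what changed: Replaces the linear level-by-level subtraction loop with a binary search for the integer square root, then derives the in-level position in closed form as the tile index minus the square of the level.
import Mathlib
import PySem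

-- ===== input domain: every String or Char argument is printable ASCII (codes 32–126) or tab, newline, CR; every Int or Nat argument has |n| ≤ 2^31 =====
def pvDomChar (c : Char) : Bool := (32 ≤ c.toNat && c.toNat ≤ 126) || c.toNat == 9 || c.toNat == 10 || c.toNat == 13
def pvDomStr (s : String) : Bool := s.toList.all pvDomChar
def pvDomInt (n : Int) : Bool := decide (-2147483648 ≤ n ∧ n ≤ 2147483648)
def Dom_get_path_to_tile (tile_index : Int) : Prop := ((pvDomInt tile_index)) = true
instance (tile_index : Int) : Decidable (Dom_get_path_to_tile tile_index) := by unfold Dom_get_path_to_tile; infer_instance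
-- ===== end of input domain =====

-- B replaces A's linear level-subtraction loop by a binary search for the integer
-- square root plus a closed-form in-level position (objective: faster).


-- ===== PORT A =====
-- A's while loop: subtract tiles_in_level, bump level, recompute tiles_in_level.
-- The '0 < tiles' conjunct is a pure totality guard: the Python loop always has
-- tiles = 2*level+1 ≥ 1 (and would not terminate otherwise).
def pyALoop (tile_index level tiles : Int) : Int × Int :=
  if _h : tiles ≤ tile_index ∧ 0 < tiles then
    pyALoop (tile_index - tiles) (level + 1) (2 * (level + 1) + 1)
  else (tile_index, level)
termination_by tile_index.toNat
decreasing_by omega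

def get_path_to_tile (tile_index : Int) : List String :=
  if tile_index ≤ 0 then []
  else
    let r := pyALoop tile_index 0 1
    let ti := r.1
    let level := r.2
    let path := List.replicate level.toNat "Forward"
    let center_of_level := level
    if ti < center_of_level then
      path ++ ["Left"] ++ List.replicate (center_of_level - ti).toNat "Forward"
    else if center_of_level < ti then
      path ++ ["Right"] ++ List.replicate (ti - center_of_level).toNat "Forward"
    else path

-- ===== PORT B =====
-- binary search for the integer square root of n on [lo, hi] (Source B's while loop)
def isqrtLoop (n lo hi : Int) : Int :=
  if _h : lo < hi then
    if PySem.Int.floordiv (lo + hi + 1) 2 * PySem.Int.floordiv (lo + hi + 1) 2 ≤ n then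
      isqrtLoop n (PySem.Int.floordiv (lo + hi + 1) 2) hi
    else
      isqrtLoop n lo (PySem.Int.floordiv (lo + hi + 1) 2 - 1)
  else lo
termination_by (hi - lo).toNat
decreasing_by
  · rw [PySem.Int.floordiv_eq_ediv_of_pos (by norm_num)]; omega
  · rw [PySem.Int.floordiv_eq_ediv_of_pos (by norm_num)]; omega

def get_path_to_tile_alt (tile_index : Int) : List String :=
  if tile_index ≤ 0 then []
  else
    let level := isqrtLoop tile_index 0 tile_index
    let pos := tile_index - level * level
    let d := pos - level
    if d < 0 then
      List.replicate level.toNat "Forward" ++ ["Left"] ++ List.replicate (-d).toNat "Forward"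
    else if 0 < d then
      List.replicate level.toNat "Forward" ++ ["Right"] ++ List.replicate d.toNat "Forward"
    else
      List.replicate level.toNat "Forward"

-- ===== PRECONDITION & SPEC =====
def Spec_get_path_to_tile (tile_index : Int) (out : List String) : Prop := out = get_path_to_tile_alt tile_index
instance (tile_index : Int) (out : List String) : Decidable (Spec_get_path_to_tile tile_index out) := by unfold Spec_get_path_to_tile; infer_instance

-- ===== CLAIM (what is proved, stated in full; the proofs are below) =====
def Claim_equal_get_path_to_tile : Prop := ∀ (tile_index : Int), Dom_get_path_to_tile tile_index → Spec_get_path_to_tile tile_index (get_path_to_tile tile_index)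

-- ===== LEMMAS AND PROOFS =====

-- A's loop invariant: result (r, L) with 0 ≤ r < 2L+1, level ≤ L, and ti + level² = r + L².
lemma pyALoop_spec (k : Nat) (ti level tiles : Int) (hk : ti.toNat = k)
    (heq : tiles = 2 * level + 1) (hti : 0 ≤ ti) (hlev : 0 ≤ level) :
    0 ≤ (pyALoop ti level tiles).1 ∧
    (pyALoop ti level tiles).1 < 2 * (pyALoop ti level tiles).2 + 1 ∧
    level ≤ (pyALoop ti level tiles).2 ∧
    ti + level * level = (pyALoop ti level tiles).1 +
      (pyALoop ti level tiles).2 * (pyALoop ti level tiles).2 := by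
  induction k using Nat.strong_induction_on generalizing ti level tiles with
  | _ k ih =>
    rw [pyALoop]
    by_cases hc : tiles ≤ ti ∧ 0 < tiles
    · rw [dif_pos hc]
      have hrec := ih (ti - tiles).toNat (by omega) (ti - tiles) (level + 1)
        (2 * (level + 1) + 1) rfl rfl (by omega) (by omega)
      refine ⟨hrec.1, hrec.2.1, by omega, ?_⟩
      have e := hrec.2.2.2
      nlinarith [e]
    · rw [dif_neg hc]
      exact ⟨hti, by omega, le_refl _, rfl⟩

-- B's binary search: keeps lo² ≤ n < (hi+1)² and lo ≤ result; ends with the integer sqrt.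
lemma isqrtLoop_spec (n lo hi : Int) (hle : lo ≤ hi)
    (h1 : lo * lo ≤ n) (h2 : n < (hi + 1) * (hi + 1)) :
    lo ≤ isqrtLoop n lo hi ∧
    (isqrtLoop n lo hi) * (isqrtLoop n lo hi) ≤ n ∧
    n < (isqrtLoop n lo hi + 1) * (isqrtLoop n lo hi + 1) := by
  induction hk : (hi - lo).toNat using Nat.strong_induction_on generalizing lo hi with
  | _ k ih =>
    rw [isqrtLoop]
    by_cases hc : lo < hi
    · rw [dif_pos hc]
      rw [PySem.Int.floordiv_eq_ediv_of_pos (by norm_num : (0:Int) < 2)]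
      have hb1 : lo + 1 ≤ (lo + hi + 1) / 2 := by omega
      have hb2 : (lo + hi + 1) / 2 ≤ hi := by omega
      by_cases hms : (lo + hi + 1) / 2 * ((lo + hi + 1) / 2) ≤ n
      · rw [if_pos hms]
        have := ih (hi - (lo + hi + 1) / 2).toNat (by omega)
          ((lo + hi + 1) / 2) hi (by omega) hms h2 rfl
        exact ⟨by omega, this.2⟩
      · rw [if_neg hms]
        have hlt : n < (lo + hi + 1) / 2 * ((lo + hi + 1) / 2) := not_le.mp hms
        have := ih ((lo + hi + 1) / 2 - 1 - lo).toNat (by omega)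
          lo ((lo + hi + 1) / 2 - 1) (by omega) h1 (by nlinarith) rfl
        exact this
    · rw [dif_neg hc]
      have : lo = hi := by omega
      subst this
      exact ⟨le_refl _, h1, h2⟩

-- uniqueness of the integer square root
lemma isqrt_unique (n a b : Int) (ha0 : 0 ≤ a) (hb0 : 0 ≤ b)
    (ha : a * a ≤ n ∧ n < (a + 1) * (a + 1)) (hb : b * b ≤ n ∧ n < (b + 1) * (b + 1)) :
    a = b := by
  by_contra hne
  rcases lt_or_gt_of_ne hne with h | h
  · have hsq : (a + 1) * (a + 1) ≤ b * b := by nlinarith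
    linarith [hb.1, ha.2]
  · have hsq : (b + 1) * (b + 1) ≤ a * a := by nlinarith
    linarith [ha.1, hb.2]

theorem get_path_to_tile_eq (tile_index : Int) :
    get_path_to_tile tile_index = get_path_to_tile_alt tile_index := by
  by_cases hpos : tile_index ≤ 0
  · simp [get_path_to_tile, get_path_to_tile_alt, hpos]
  · have hpos' : 0 < tile_index := by omega
    obtain ⟨h1, h2, h3, h4⟩ :=
      pyALoop_spec tile_index.toNat tile_index 0 1 rfl (by norm_num) hpos'.le le_rfl
    obtain ⟨g0, g1, g2⟩ :=
      isqrtLoop_spec tile_index 0 tile_index hpos'.le (by simpa using hpos'.le) (by nlinarith)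
    simp only [get_path_to_tile, get_path_to_tile_alt, if_neg hpos]
    set r := pyALoop tile_index 0 1 with hr
    set L := isqrtLoop tile_index 0 tile_index with hL
    have hr2 : r.2 = L :=
      isqrt_unique tile_index r.2 L h3 g0 ⟨by linarith, by nlinarith⟩ ⟨g1, g2⟩
    have hr1 : r.1 = tile_index - L * L := by rw [hr2] at h4; linarith
    rw [hr2, hr1]
    generalize tile_index - L * L = p
    rcases lt_trichotomy p L with h | h | h
    · rw [if_pos h, if_pos (by omega : p - L < 0)]
      rw [show (-(p - L)).toNat = (L - p).toNat from by omega]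
    · rw [if_neg (by omega), if_neg (by omega), if_neg (by omega), if_neg (by omega)]
    · rw [if_neg (by omega), if_pos h, if_neg (by omega), if_pos (by omega : 0 < p - L)]

-- ===== VERDICT (by name: the statement is the Claim_ definition above) =====
theorem get_path_to_tile_spec : Claim_equal_get_path_to_tile := by
  intro tile_index _
  unfold Spec_get_path_to_tile
  exact get_path_to_tile_eq tile_index
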